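-- pv_equiv track=rewrite | github.com/lge0322/F2021_public | 15112-F21/Week8/busiestStudents_starter.py | busiestStudents
-- ===== SOURCE A (Python) =====
-- def busiestStudents(rosters):
--     newDict = dict()
--     for course in rosters:
--         students = rosters[course]
--         for student in students:
--             newDict[student] = newDict.get(student, 0) + 1
--
--     #best template, find the students with the most number of classes
--
--     bestStudents = set()
--     bestClassNum = 0
--     for student in newDict:
--         curCourses = newDict[student]
--         if curCourses > bestClassNum:
--             bestClassNum = curCourses
--             bestStudents = {student}
--         elif curCourses == bestClassNum:
--             bestStudents.add(student)
--     return bestStudents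
-- ===== SOURCE B (Python) =====
-- def busiestStudents(rosters):
--     # No counting dict and no running-best loop: flatten the rosters and use
--     # list.count as the multiplicity function directly; take the max multiplicity,
--     # then keep the students that reach it via a set comprehension.
--     allStudents = [s for students in rosters.values() for s in students]
--     if not allStudents:
--         return set()
--     best = max(map(allStudents.count, allStudents))
--     return {s for s in allStudents if allStudents.count(s) == best}
-- ===== Notes on version B (the rewrite author's own statement) =====
-- stated objective: alternative
-- what changed: B drops A's counting dict and running-best loop entirely: it flattens the rosters and uses list.count as the multiplicity function, taking max(map(count, allStudents)) and then a set comprehension of the students reaching that maximum (two brute-force counting passes over the flat list instead of hash counting plus a best-so-far scan).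
import Mathlib
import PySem

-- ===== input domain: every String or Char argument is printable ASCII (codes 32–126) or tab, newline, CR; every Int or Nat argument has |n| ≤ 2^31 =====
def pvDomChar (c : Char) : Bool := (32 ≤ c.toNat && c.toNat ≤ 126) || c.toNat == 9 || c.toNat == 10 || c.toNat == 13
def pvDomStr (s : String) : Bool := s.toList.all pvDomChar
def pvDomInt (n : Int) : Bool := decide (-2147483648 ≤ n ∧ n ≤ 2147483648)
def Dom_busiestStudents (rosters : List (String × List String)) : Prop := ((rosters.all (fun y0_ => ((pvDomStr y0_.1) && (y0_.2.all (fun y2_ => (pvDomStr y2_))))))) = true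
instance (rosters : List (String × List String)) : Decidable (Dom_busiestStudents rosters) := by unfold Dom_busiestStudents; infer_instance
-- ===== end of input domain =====

-- B drops A's counting dict and running-best loop: it flattens the rosters and uses
-- list.count as the multiplicity function (max of the counts, then filter); objective:
-- alternative (B is not faster).

-- ===== PORT A =====
-- 'for course in rosters: students = rosters[course]' (dict iteration + lookup) is
-- ported as a fold over .items — exact, since dict keys are unique; same for the
-- second loop over newDict.
def busiestStudents (rosters : List (String × List String)) : List String :=
  let d := PySem.Dict.ofList rosters
  let newDict : PySem.Dict String Int :=
    d.items.foldl (fun nd p =>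
        p.2.foldl (fun nd student => nd.insert student (nd.getD student 0 + 1)) nd)
      PySem.Dict.empty
  let res : PySem.Set String × Int :=
    newDict.items.foldl (fun st p =>
        if p.2 > st.2 then (PySem.Set.ofList [p.1], p.2)
        else if p.2 == st.2 then (PySem.Set.add st.1 p.1, st.2)
        else st)
      (PySem.Set.empty, 0)
  res.1

-- ===== PORT B =====
-- 'max(map(allStudents.count, allStudents))' is guarded by the emptiness test, so
-- max? is some there; '.getD 0' only totalises the expression.
def busiestStudents_alt (rosters : List (String × List String)) : List String :=
  let allStudents := (PySem.Dict.ofList rosters).values.flatMap (fun ss => ss)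
  if allStudents = [] then PySem.Set.empty
  else
    let best := (PySem.List.max? (allStudents.map (fun s => (allStudents.count s : Int)))
        (fun v => v)).getD 0
    PySem.Set.ofList (allStudents.filter (fun s => (allStudents.count s : Int) == best))

-- ===== PRECONDITION & SPEC =====
def Spec_busiestStudents (rosters : List (String × List String)) (out : List String) : Prop := out = busiestStudents_alt rosters
instance (rosters : List (String × List String)) (out : List String) : Decidable (Spec_busiestStudents rosters out) := by unfold Spec_busiestStudents; infer_instance

-- ===== CLAIM (what is proved, stated in full; the proofs are below) =====
def Claim_equal_busiestStudents : Prop := ∀ (rosters : List (String × List String)), Dom_busiestStudents rosters → Spec_busiestStudents rosters (busiestStudents rosters)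

-- ===== LEMMAS AND PROOFS =====

-- the nested counting loop over (course, students) pairs counts the flattened list
lemma foldl_nested_eq_flatMap (l : List (String × List String))
    (f : PySem.Dict String Int → String → PySem.Dict String Int)
    (d : PySem.Dict String Int) :
    l.foldl (fun nd p => p.2.foldl f nd) d = (l.flatMap (fun p => p.2)).foldl f d := by
  induction l generalizing d with
  | nil => rfl
  | cons q t ih => simp [List.flatMap_cons, List.foldl_append, ih]

-- A's running-best loop over the items of a dict whose values are all positive and
-- whose keys are distinct computes exactly (students with maximal count, that count)
lemma loopA_eq
    (ps : List (String × Int))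
    (hnd : (ps.map Prod.fst).Nodup)
    (hpos : ∀ p ∈ ps, 0 < p.2)
    (hne : ps ≠ []) :
    ps.foldl (fun (st : PySem.Set String × Int) p =>
        if p.2 > st.2 then (PySem.Set.ofList [p.1], p.2)
        else if p.2 == st.2 then (PySem.Set.add st.1 p.1, st.2)
        else st)
      (PySem.Set.empty, 0)
    = ((ps.filter (fun p =>
          p.2 == (PySem.List.max? (ps.map Prod.snd) (fun v => v)).getD 0)).map Prod.fst,
       (PySem.List.max? (ps.map Prod.snd) (fun v => v)).getD 0) := by
  induction ps using List.reverseRecOn with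
  | nil => exact absurd rfl hne
  | append_singleton qs p ih =>
    by_cases hq : qs = []
    · subst hq
      have hp : 0 < p.2 := hpos p (by simp)
      simp [PySem.List.max?, hp, PySem.Set.empty, PySem.Set.ofList]
    · -- qs nonempty: use the IH and analyse p.2 against the running maximum
      have hnd' : (qs.map Prod.fst).Nodup := by
        have := hnd; rw [List.map_append] at this; exact this.sublist (List.sublist_append_left _ _)
      have hpos' : ∀ q ∈ qs, 0 < q.2 := fun q hq' => hpos q (by simp [hq'])
      obtain ⟨m, hm⟩ : ∃ m, PySem.List.max? (qs.map Prod.snd) (fun v => v) = some m := by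
        rcases h : PySem.List.max? (qs.map Prod.snd) (fun v => v) with _ | m
        · exact absurd (by simpa using (PySem.List.max?_eq_none_iff _ _).mp h) hq
        · exact ⟨m, rfl⟩
      have hle : ∀ v ∈ qs.map Prod.snd, v ≤ m := by
        intro v hv; exact PySem.List.max?_isMax hm v hv
      -- max over qs ++ [p] is max m p.2
      have hmax : PySem.List.max? ((qs ++ [p]).map Prod.snd) (fun v => v) = some (max m p.2) := by
        obtain ⟨x, t, hxt⟩ : ∃ x t, qs.map Prod.snd = x :: t := by
          rcases h : qs.map Prod.snd with _ | ⟨x, t⟩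
          · exact absurd (by simpa using h) hq
          · exact ⟨x, t, rfl⟩
        have hm' : m = t.foldl max x := by
          have := hm; rw [hxt, PySem.List.max?_id_cons] at this; exact (Option.some_inj.mp this).symm
        rw [List.map_append, hxt]
        show PySem.List.max? (x :: (t ++ [p.2])) (fun v => v) = _
        rw [PySem.List.max?_id_cons, List.foldl_append, hm']
        simp
      have hIH := ih hnd' hpos' hq
      rw [List.foldl_append, hIH, List.foldl_cons, List.foldl_nil, hmax, hm]
      simp only [Option.getD_some]
      rcases lt_trichotomy m p.2 with hlt | heq | hgt
      · -- new strict maximum: the set is reset to {p.1}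
        have hmx : max m p.2 = p.2 := by omega
        have hfq : qs.filter (fun q => q.2 == p.2) = [] := by
          rw [List.filter_eq_nil_iff]
          intro q hq'
          have : q.2 ≤ m := hle q.2 (List.mem_map_of_mem hq')
          simp only [beq_iff_eq]; omega
        simp [hlt, hmx, List.filter_append, hfq, PySem.Set.ofList, PySem.Set.add]
      · -- ties the maximum: appended to the set
        subst heq
        have hnotmem : p.1 ∉ (qs.filter (fun q => q.2 == p.2)).map Prod.fst := by
          have h1 : p.1 ∉ qs.map Prod.fst := by
            have := hnd; rw [List.map_append] at this
            have := List.disjoint_of_nodup_append this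
            intro hmem; exact this hmem (by simp)
          intro hmem
          exact h1 (((List.filter_sublist).map Prod.fst).subset hmem)
        simp only [max_self, gt_iff_lt, lt_irrefl, if_false, beq_self_eq_true, if_true,
          List.filter_append, List.filter_cons, List.filter_nil, List.map_append]
        rw [PySem.Set.add_of_not_mem hnotmem]
        simp
      · -- below the maximum: state unchanged, p filtered out
        have hmx : max m p.2 = m := by omega
        have hne' : ¬ (p.2 == m) = true := by simp only [beq_iff_eq]; omega
        simp [hmx, show ¬ (m < p.2) by omega, hne', List.filter_append]

-- first-occurrence dedup commutes with filtering by a property of the element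
lemma ofList_filter {α : Type} [BEq α] [LawfulBEq α] (p : α → Bool) (xs : List α) :
    PySem.Set.ofList (xs.filter p) = (PySem.Set.ofList xs).filter p := by
  have hsnoc : ∀ (l : List α) (x : α),
      PySem.Set.ofList (l ++ [x]) = PySem.Set.add (PySem.Set.ofList l) x := by
    intro l x
    rw [PySem.Set.ofList_eq_foldl, PySem.Set.ofList_eq_foldl, List.foldl_append]; rfl
  induction xs using List.reverseRecOn with
  | nil => rfl
  | append_singleton t x ih =>
    rw [List.filter_append, hsnoc]
    by_cases hp : p x = true
    · simp only [List.filter_cons, List.filter_nil, hp, if_true]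
      rw [hsnoc, ih]
      by_cases hx : x ∈ PySem.Set.ofList t
      · rw [PySem.Set.add_of_mem hx,
          PySem.Set.add_of_mem (List.mem_filter.mpr ⟨hx, hp⟩)]
      · rw [PySem.Set.add_of_not_mem hx,
          PySem.Set.add_of_not_mem (fun hc => hx (List.mem_filter.mp hc).1),
          List.filter_append]
        simp [hp]
    · have hp' : p x = false := by rwa [Bool.not_eq_true] at hp
      simp only [List.filter_cons, List.filter_nil, hp', Bool.false_eq_true, if_false,
        List.append_nil]
      rw [ih]
      by_cases hx : x ∈ PySem.Set.ofList t
      · rw [PySem.Set.add_of_mem hx]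
      · rw [PySem.Set.add_of_not_mem hx, List.filter_append]
        simp [hp']

-- two nonempty lists with the same members have the same maximum
lemma max?_congr_mem (l₁ l₂ : List Int) (h : ∀ v, v ∈ l₁ ↔ v ∈ l₂)
    (h₁ : l₁ ≠ []) : PySem.List.max? l₁ (fun v => v) = PySem.List.max? l₂ (fun v => v) := by
  have h₂ : l₂ ≠ [] := by
    intro hc; rcases List.exists_mem_of_ne_nil l₁ h₁ with ⟨v, hv⟩
    rw [h v, hc] at hv; simp at hv
  obtain ⟨m₁, hm₁⟩ : ∃ m, PySem.List.max? l₁ (fun v => v) = some m := by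
    rcases hx : PySem.List.max? l₁ (fun v => v) with _ | m
    · exact absurd ((PySem.List.max?_eq_none_iff _ _).mp hx) h₁
    · exact ⟨m, rfl⟩
  obtain ⟨m₂, hm₂⟩ : ∃ m, PySem.List.max? l₂ (fun v => v) = some m := by
    rcases hx : PySem.List.max? l₂ (fun v => v) with _ | m
    · exact absurd ((PySem.List.max?_eq_none_iff _ _).mp hx) h₂
    · exact ⟨m, rfl⟩
  rw [hm₁, hm₂]
  have e₁ := PySem.List.max?_isMax hm₂ m₁ ((h m₁).mp (PySem.List.max?_mem hm₁))
  have e₂ := PySem.List.max?_isMax hm₁ m₂ ((h m₂).mpr (PySem.List.max?_mem hm₂))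
  simp only at e₁ e₂
  exact congrArg some (le_antisymm e₁ e₂)

theorem busiestStudents_spec_aux (rosters : List (String × List String)) :
    busiestStudents rosters = busiestStudents_alt rosters := by
  unfold busiestStudents busiestStudents_alt
  simp only
  set d := PySem.Dict.ofList rosters with hd
  set allS := d.values.flatMap (fun ss => ss) with hallS
  have hflat : d.items.foldl
      (fun nd p => p.2.foldl (fun nd student => nd.insert student (nd.getD student 0 + 1)) nd)
      (PySem.Dict.empty : PySem.Dict String Int)
      = PySem.Dict.counter allS := by
    rw [foldl_nested_eq_flatMap, ← PySem.Dict.foldl_insert_getD_add_one_eq_counter]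
    congr 1
    show d.items.flatMap (fun p => p.2) = (d.items.map Prod.snd).flatMap (fun ss => ss)
    rw [List.flatMap_map]
  rw [hflat]
  have hitems : (PySem.Dict.counter allS).items
      = (PySem.Set.ofList allS).map (fun k => (k, (allS.count k : Int))) :=
    PySem.Dict.items_counter allS
  by_cases he : allS = []
  · simp only [he]
    simp [PySem.Dict.counter, PySem.Dict.empty, PySem.Set.empty]
  · have hne : (PySem.Dict.counter allS).items ≠ [] := by
      rw [hitems]
      intro hc
      rcases List.exists_mem_of_ne_nil allS he with ⟨s, hs⟩
      have : s ∈ PySem.Set.ofList allS := (PySem.Set.mem_ofList _ _).mpr hs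
      rw [List.map_eq_nil_iff.mp hc] at this
      simp at this
    have hnd : ((PySem.Dict.counter allS).items.map Prod.fst).Nodup :=
      PySem.Dict.nodup_keys_counter allS
    have hpos : ∀ p ∈ (PySem.Dict.counter allS).items, 0 < p.2 := by
      intro p hp
      rw [hitems] at hp
      rcases List.mem_map.mp hp with ⟨k, hk, rfl⟩
      have : k ∈ allS := (PySem.Set.mem_ofList _ _).mp hk
      have := List.count_pos_iff.mpr this
      simp only
      exact_mod_cast this
    rw [loopA_eq _ hnd hpos hne, if_neg he]
    -- the two maxima agree
    have hmax : PySem.List.max? ((PySem.Dict.counter allS).items.map Prod.snd) (fun v => v)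
        = PySem.List.max? (allS.map (fun s => (allS.count s : Int))) (fun v => v) := by
      apply max?_congr_mem
      · intro v
        rw [hitems, List.map_map]
        constructor
        · intro hv
          rcases List.mem_map.mp hv with ⟨k, hk, rfl⟩
          exact List.mem_map.mpr ⟨k, (PySem.Set.mem_ofList _ _).mp hk, rfl⟩
        · intro hv
          rcases List.mem_map.mp hv with ⟨k, hk, rfl⟩
          exact List.mem_map.mpr ⟨k, (PySem.Set.mem_ofList _ _).mpr hk, rfl⟩
      · rw [hitems]
        intro hc
        rcases List.exists_mem_of_ne_nil allS he with ⟨s, hs⟩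
        have : s ∈ PySem.Set.ofList allS := (PySem.Set.mem_ofList _ _).mpr hs
        rw [List.map_eq_nil_iff.mp (List.map_eq_nil_iff.mp hc)] at this
        simp at this
    rw [hmax, hitems]
    rw [List.filter_map, List.map_map, ofList_filter]
    simp only [Function.comp_def]
    simp
  
-- ===== VERDICT (by name: the statement is the Claim_ definition above) =====
theorem busiestStudents_spec : Claim_equal_busiestStudents := by
  intro rosters _
  exact busiestStudents_spec_aux rosters
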